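-- pv_equiv track=rewrite | github.com/MADAO81/Codewars_tasks | 7 kyu/Send in the Clones 7 kyu.py | clonewars
-- ===== SOURCE A (Python) =====
-- def clonewars(kata_per_day):
--     clone_qty = 1
--     kata = 0
--     while kata_per_day:
--         kata += kata_per_day * clone_qty
--         kata_per_day -= 1
--         if kata_per_day:
--             clone_qty += clone_qty
--     return [clone_qty, kata]
-- ===== SOURCE B (Python) =====
-- def clonewars(kata_per_day):
--     if not kata_per_day:
--         return [1, 0]
--     n = kata_per_day
--     return [2 ** (n - 1), 2 ** (n + 1) - n - 2]
-- ===== Notes on version B (the rewrite author's own statement) =====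
-- stated objective: faster
-- what changed: Replaces the day-by-day simulation loop with closed-form expressions (a single power of two for the clone count and one for the kata total), special-casing day zero; intended as faster, a timing run measured a ratio of about 880x at the largest size both finished (n=65536).
import Mathlib
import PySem

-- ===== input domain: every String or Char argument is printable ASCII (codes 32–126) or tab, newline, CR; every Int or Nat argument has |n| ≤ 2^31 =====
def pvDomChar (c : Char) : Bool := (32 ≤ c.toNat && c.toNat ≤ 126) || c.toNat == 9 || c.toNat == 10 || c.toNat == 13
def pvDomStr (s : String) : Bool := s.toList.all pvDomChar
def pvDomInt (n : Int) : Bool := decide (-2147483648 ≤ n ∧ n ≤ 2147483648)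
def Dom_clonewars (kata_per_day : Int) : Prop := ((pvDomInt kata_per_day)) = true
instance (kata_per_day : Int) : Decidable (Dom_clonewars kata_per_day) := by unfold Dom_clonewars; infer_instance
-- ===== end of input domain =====

-- B replaces A's day-by-day simulation loop with closed-form powers of two (objective: faster; a timing run measured B far ahead at the largest size both finished).


-- ===== PORT A =====
-- the while loop; fuel = kata_per_day.toNat, exactly the number of iterations on Pre_
def clonewarsLoop (fuel : Nat) (kata_per_day clone_qty kata : Int) : List Int :=
  match fuel with
  | 0 => [clone_qty, kata]
  | fuel + 1 =>
    if kata_per_day ≠ 0 then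
      let kata := kata + kata_per_day * clone_qty
      let kata_per_day := kata_per_day - 1
      if kata_per_day ≠ 0 then
        clonewarsLoop fuel kata_per_day (clone_qty + clone_qty) kata
      else
        clonewarsLoop fuel kata_per_day clone_qty kata
    else [clone_qty, kata]

def clonewars (kata_per_day : Int) : List Int :=
  clonewarsLoop kata_per_day.toNat kata_per_day 1 0

-- ===== PORT B =====
def clonewars_alt (kata_per_day : Int) : List Int :=
  if kata_per_day = 0 then [1, 0]
  else [2 ^ (kata_per_day - 1).toNat, 2 ^ (kata_per_day + 1).toNat - kata_per_day - 2]

-- ===== PRECONDITION & SPEC =====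
-- A's while loop never terminates for negative kata_per_day; Pre_ excludes exactly those inputs.
def Pre_clonewars (kata_per_day : Int) : Prop := 0 ≤ kata_per_day
instance (kata_per_day : Int) : Decidable (Pre_clonewars kata_per_day) := by unfold Pre_clonewars; infer_instance
def pvWitness_clonewars : Int := (5)

def Spec_clonewars (kata_per_day : Int) (out : List Int) : Prop := out = clonewars_alt kata_per_day
instance (kata_per_day : Int) (out : List Int) : Decidable (Spec_clonewars kata_per_day out) := by unfold Spec_clonewars; infer_instance

-- ===== CLAIM (what is proved, stated in full; the proofs are below) =====
def Claim_equal_clonewars : Prop := ∀ (kata_per_day : Int), Dom_clonewars kata_per_day → Pre_clonewars kata_per_day → Spec_clonewars kata_per_day (clonewars kata_per_day)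

-- ===== LEMMAS AND PROOFS =====

-- loop invariant: with fuel = kata_per_day = n ≥ 1, the loop returns the closed form scaled by clone_qty
lemma clonewarsLoop_closed (n : Nat) (hn : 1 ≤ n) (clone_qty kata : Int) :
    clonewarsLoop n (n : Int) clone_qty kata
      = [clone_qty * 2 ^ (n - 1), kata + clone_qty * (2 ^ (n + 1) - n - 2)] := by
  induction n generalizing clone_qty kata with
  | zero => omega
  | succ m ih =>
    by_cases hm : 1 ≤ m
    · have hne : ((m : Int) + 1) ≠ 0 := by positivity
      have hne2 : ((m : Int) + 1) - 1 ≠ 0 := by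
        have : (1:Int) ≤ (m:Int) := by exact_mod_cast hm
        omega
      simp only [clonewarsLoop, Nat.cast_succ, hne, hne2, if_pos, ne_eq, not_false_eq_true]
      have : ((m : Int) + 1) - 1 = (m : Int) := by ring
      rw [this, ih hm]
      have h1 : m - 1 + 1 = m := Nat.sub_add_cancel hm
      have h2 : m + 1 - 1 = m := rfl
      simp only [List.cons.injEq, and_true]
      refine ⟨?_, ?_⟩
      · have hpow : (2 : Int) ^ m = 2 ^ (m - 1) * 2 := by rw [← pow_succ, h1]
        rw [h2, hpow]; ring
      · have hp : (2 : Int) ^ (m + 1 + 1) = 2 * 2 ^ (m + 1) := by rw [pow_succ]; ring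
        rw [hp]; ring
    · have hm0 : m = 0 := by omega
      subst hm0
      norm_num [clonewarsLoop]

theorem clonewars_spec : Claim_equal_clonewars := by
  intro n _ hpre
  have hge : (0 : Int) ≤ n := hpre
  obtain ⟨m, rfl⟩ := Int.eq_ofNat_of_zero_le hge
  unfold Spec_clonewars clonewars clonewars_alt
  by_cases h0 : m = 0
  · subst h0; simp [clonewarsLoop]
  · have h1 : 1 ≤ m := Nat.one_le_iff_ne_zero.mpr h0
    have h0' : (m : Int) ≠ 0 := by exact_mod_cast h0
    simp only [Int.toNat_natCast]
    rw [if_neg h0', clonewarsLoop_closed m h1 1 0]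
    have e1 : ((m : Int) - 1).toNat = m - 1 := by omega
    have e2 : ((m : Int) + 1).toNat = m + 1 := by omega
    rw [e1, e2]
    simp
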